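-- pv_equiv track=rewrite | github.com/openalea-incubator/adel | adel/plantgen/axeT.py | _gen_index_plt_list
-- ===== SOURCE A (Python) =====
-- def _gen_index_plt_list(plant_ids, id_cohort_axis_list):
--     '''Generate the *id_plt* column.'''
--     index_plt_list = []
--     current_plant_index = 0
--     for plant_id in plant_ids:
--         start_index = current_plant_index + 1
--         if 1 in id_cohort_axis_list[start_index:]:
--             next_plant_first_row = id_cohort_axis_list.index(1, start_index)
--         else:
--             next_plant_first_row = len(id_cohort_axis_list)
--         current_plant_axes = id_cohort_axis_list[current_plant_index:next_plant_first_row]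
--         index_plt_list.extend([plant_id for current_plant_axis in current_plant_axes])
--         current_plant_index = next_plant_first_row
--     return index_plt_list
-- ===== SOURCE B (Python) =====
-- def _gen_index_plt_list(plant_ids, id_cohort_axis_list):
--     '''Generate the *id_plt* column.'''
--     n = len(id_cohort_axis_list)
--     # positions of the cohort marker 1 (index >= 1) are the plant boundaries
--     bounds = [i for i in range(1, n) if id_cohort_axis_list[i] == 1]
--     starts = [0] + bounds
--     ends = bounds + [n]
--     out = []
--     for plant_id, start, end in zip(plant_ids, starts, ends):
--         out.extend([plant_id] * (end - start))
--     return out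
-- ===== Notes on version B (the rewrite author's own statement) =====
-- stated objective: faster
-- what changed: B replaces A's per-plant scans (a membership test, an index search and a slice over the whole list for every plant id) by a single pass that records the positions of marker 1 as segment boundaries and then emits each plant id repeated by its segment length.
import Mathlib
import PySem

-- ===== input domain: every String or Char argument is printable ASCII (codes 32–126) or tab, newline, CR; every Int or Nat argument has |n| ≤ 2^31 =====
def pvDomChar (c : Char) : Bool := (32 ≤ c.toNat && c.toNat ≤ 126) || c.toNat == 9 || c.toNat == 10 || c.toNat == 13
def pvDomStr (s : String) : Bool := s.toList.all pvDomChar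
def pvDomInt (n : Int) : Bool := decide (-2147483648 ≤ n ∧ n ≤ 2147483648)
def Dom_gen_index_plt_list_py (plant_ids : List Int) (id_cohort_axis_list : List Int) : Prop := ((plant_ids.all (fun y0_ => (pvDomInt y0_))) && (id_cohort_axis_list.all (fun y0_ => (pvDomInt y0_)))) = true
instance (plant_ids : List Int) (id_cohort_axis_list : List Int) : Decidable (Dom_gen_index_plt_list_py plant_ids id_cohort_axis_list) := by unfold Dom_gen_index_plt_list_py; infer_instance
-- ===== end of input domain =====

-- B replaces A's per-plant membership test / index search / slice over the whole
-- list by one pass that records the positions of marker 1 as segment boundaries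
-- (objective: faster; both functions are total, so there is no Pre_).


-- ===== PORT A =====
-- `list.index(1, start)` (start ≥ 0 here, and guarded by the membership test on the
-- same slice) is ported exactly as start + first index of 1 in the slice from start.
def gen_index_plt_list_py (plant_ids : List Int) (id_cohort_axis_list : List Int) : List Int :=
  (plant_ids.foldl
    (fun (st : List Int × Int) plant_id =>
      let start_index : Int := st.2 + 1
      let next_plant_first_row : Int :=
        if (PySem.List.slice id_cohort_axis_list (some start_index) none).contains 1 then
          start_index + (((PySem.List.index? (PySem.List.slice id_cohort_axis_list (some start_index) none) 1).getD 0 : Nat) : Int)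
        else (id_cohort_axis_list.length : Int)
      let current_plant_axes := PySem.List.slice id_cohort_axis_list (some st.2) (some next_plant_first_row)
      (st.1 ++ current_plant_axes.map (fun _ => plant_id), next_plant_first_row))
    ([], 0)).1

-- ===== PORT B =====
def gen_index_plt_list_py_alt (plant_ids : List Int) (id_cohort_axis_list : List Int) : List Int :=
  let n : Int := id_cohort_axis_list.length
  let bounds : List Int := (PySem.List.pyRange 1 n 1).filter
    (fun i => PySem.List.pyGetD id_cohort_axis_list i 0 == 1)
  let starts : List Int := 0 :: bounds
  let ends : List Int := bounds ++ [n]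
  (plant_ids.zip (starts.zip ends)).foldl
    (fun out p => out ++ List.replicate (p.2.2 - p.2.1).toNat p.1) []

-- ===== PRECONDITION & SPEC =====
def Spec_gen_index_plt_list_py (plant_ids : List Int) (id_cohort_axis_list : List Int) (out : List Int) : Prop := out = gen_index_plt_list_py_alt plant_ids id_cohort_axis_list
instance (plant_ids : List Int) (id_cohort_axis_list : List Int) (out : List Int) : Decidable (Spec_gen_index_plt_list_py plant_ids id_cohort_axis_list out) := by unfold Spec_gen_index_plt_list_py; infer_instance

-- ===== CLAIM (what is proved, stated in full; the proofs are below) =====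
def Claim_equal_gen_index_plt_list_py : Prop := ∀ (plant_ids : List Int) (id_cohort_axis_list : List Int), Dom_gen_index_plt_list_py plant_ids id_cohort_axis_list → Spec_gen_index_plt_list_py plant_ids id_cohort_axis_list (gen_index_plt_list_py plant_ids id_cohort_axis_list)

-- ===== LEMMAS AND PROOFS =====

-- A's loop body / B's loop body as named step functions (definitionally the ports' lambdas)
def pvStepA (lst : List Int) (st : List Int × Int) (plant_id : Int) : List Int × Int :=
  let start_index : Int := st.2 + 1
  let next_plant_first_row : Int :=
    if (PySem.List.slice lst (some start_index) none).contains 1 then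
      start_index + (((PySem.List.index? (PySem.List.slice lst (some start_index) none) 1).getD 0 : Nat) : Int)
    else (lst.length : Int)
  let current_plant_axes := PySem.List.slice lst (some st.2) (some next_plant_first_row)
  (st.1 ++ current_plant_axes.map (fun _ => plant_id), next_plant_first_row)

def pvStepB (out : List Int) (p : Int × (Int × Int)) : List Int :=
  out ++ List.replicate (p.2.2 - p.2.1).toNat p.1

def pvPred (lst : List Int) (i : Int) : Bool := PySem.List.pyGetD lst i 0 == 1

def pvBnds (lst : List Int) (a : Int) : List Int :=
  (PySem.List.pyRange a lst.length 1).filter (pvPred lst)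

lemma portA_eq (plant_ids lst : List Int) :
    gen_index_plt_list_py plant_ids lst = (plant_ids.foldl (pvStepA lst) ([], 0)).1 := rfl

lemma portB_eq (plant_ids lst : List Int) :
    gen_index_plt_list_py_alt plant_ids lst =
      (plant_ids.zip ((0 :: pvBnds lst 1).zip (pvBnds lst 1 ++ [(lst.length : Int)]))).foldl pvStepB [] := rfl

-- the membership test on the slice is non-emptiness of the filtered boundary range
lemma contains_iff (lst : List Int) (a : Int) (ha : 0 ≤ a) :
    (PySem.List.slice lst (some a) none).contains 1 = true ↔ pvBnds lst a ≠ [] := by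
  rw [PySem.List.slice_from lst ha]
  unfold pvBnds
  rw [← PySem.List.map_pyGetD_pyRange' lst 0 ha]
  simp only [List.contains_iff_mem, List.mem_map, ne_eq, List.filter_eq_nil_iff, not_forall,
    pvPred, beq_iff_eq]
  tauto

-- the head of the filtered boundary range: first marker position, nothing before it
lemma bnds_head (lst : List Int) (a b : Int) (rest : List Int)
    (h : pvBnds lst a = b :: rest) :
    a ≤ b ∧ b < lst.length ∧ pvPred lst b = true ∧
      (∀ x ∈ PySem.List.pyRange a b 1, pvPred lst x = false) ∧ rest = pvBnds lst (b + 1) := by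
  unfold pvBnds at h
  rw [List.filter_eq_cons_iff] at h
  obtain ⟨l₁, l₂, hsplit, hl₁, hpb, hfl₂⟩ := h
  have hlen : ((lst.length : Int) - a).toNat = l₁.length + (l₂.length + 1) := by
    have := congrArg List.length hsplit
    simpa [PySem.List.length_pyRange_one] using this
  have h1 : a + (l₁.length : Int) < (lst.length : Int) := by omega
  have happ := PySem.List.pyRange_one_append a (a + l₁.length) (lst.length : Int)
    (by omega) (by omega)
  rw [PySem.List.pyRange_one_cons h1, hsplit] at happ
  have hinj := List.append_inj happ
    (by simp [PySem.List.length_pyRange_one])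
  obtain ⟨he1, he2⟩ := hinj
  have hb : b = a + (l₁.length : Int) := by
    simpa using congrArg (fun l => l.headI) he2
  have hl₂ : l₂ = PySem.List.pyRange (b + 1) (lst.length : Int) 1 := by
    have := congrArg List.tail he2
    simpa [hb] using this
  refine ⟨by omega, by omega, hpb, ?_, ?_⟩
  · intro x hx
    have : x ∈ l₁ := by rw [he1]; exact hb ▸ hx
    simpa using hl₁ x this
  · rw [← hfl₂, hl₂]; rfl

-- the index search of A lands exactly on that head
lemma index_eq (lst : List Int) (a b : Int) (rest : List Int) (ha : 0 ≤ a)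
    (h : pvBnds lst a = b :: rest) :
    PySem.List.index? (PySem.List.slice lst (some a) none) 1 = some (b - a).toNat := by
  obtain ⟨hab, hbn, hpb, hnone, -⟩ := bnds_head lst a b rest h
  rw [PySem.List.slice_from lst ha, ← PySem.List.map_pyGetD_pyRange' lst 0 ha]
  rw [PySem.List.index?_eq_some_iff]
  refine ⟨(PySem.List.pyRange a b 1).map (fun j => PySem.List.pyGetD lst j 0),
          (PySem.List.pyRange (b+1) (lst.length : Int) 1).map (fun j => PySem.List.pyGetD lst j 0),
          ?_, ?_, ?_⟩
  · rw [PySem.List.pyRange_one_append a b (lst.length : Int) hab (le_of_lt hbn),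
        PySem.List.pyRange_one_cons hbn]
    simp only [List.map_append, List.map_cons]
    have : PySem.List.pyGetD lst b 0 = 1 := by simpa [pvPred] using hpb
    rw [this]
  · simp [PySem.List.length_pyRange_one]
  · intro hmem
    obtain ⟨j, hj, hfj⟩ := List.mem_map.mp hmem
    have := hnone j hj
    simp [pvPred, hfj] at this

-- one step of A appends its segment as a replicate and moves the cursor to nxt
lemma stepA_eq (lst : List Int) (acc : List Int) (c nxt : Int) (p : Int)
    (h0 : 0 ≤ c) (hcn : c ≤ nxt) (hnn : nxt ≤ (lst.length : Int))
    (hnxt : (if (PySem.List.slice lst (some (c+1)) none).contains 1 then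
          (c+1) + (((PySem.List.index? (PySem.List.slice lst (some (c+1)) none) 1).getD 0 : Nat) : Int)
        else (lst.length : Int)) = nxt) :
    pvStepA lst (acc, c) p = (acc ++ List.replicate (nxt - c).toNat p, nxt) := by
  dsimp only [pvStepA]
  rw [hnxt, PySem.List.slice_toNat lst h0 (by omega), List.map_const']
  have : (List.take (nxt.toNat - c.toNat) (List.drop c.toNat lst)).length = (nxt - c).toNat := by
    simp only [List.length_take, List.length_drop]
    omega
  rw [this]

-- main invariant: from any cursor position c, A's remaining fold equals B's fold
-- over the plant ids zipped with the remaining segments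
lemma fold_eq (lst : List Int) (pids : List Int) :
    ∀ (acc : List Int) (c : Int), 0 ≤ c → c ≤ (lst.length : Int) →
    (pids.foldl (pvStepA lst) (acc, c)).1 =
      (pids.zip ((c :: pvBnds lst (c + 1)).zip (pvBnds lst (c + 1) ++ [(lst.length : Int)]))).foldl pvStepB acc := by
  induction pids with
  | nil => intro acc c h0 hn; simp
  | cons p ps ih =>
    intro acc c h0 hn
    rw [List.foldl_cons]
    cases hb : pvBnds lst (c + 1) with
    | nil =>
      have hcont : (PySem.List.slice lst (some (c+1)) none).contains 1 = false := by
        rw [← Bool.not_eq_true, contains_iff lst (c+1) (by omega)]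
        simp [hb]
      rw [stepA_eq lst acc c (lst.length : Int) p h0 hn le_rfl (by rw [hcont]; simp)]
      have hb' : pvBnds lst ((lst.length : Int) + 1) = [] := by
        unfold pvBnds; rw [PySem.List.pyRange_one_eq_nil (by omega)]; rfl
      rw [ih _ (lst.length : Int) (by omega) le_rfl, hb']
      cases ps with
      | nil => simp [pvStepB]
      | cons q qs => simp [pvStepB]
    | cons b rest =>
      obtain ⟨hab, hbn, hpb, hnone, hrest⟩ := bnds_head lst (c+1) b rest hb
      have hcont : (PySem.List.slice lst (some (c+1)) none).contains 1 = true := by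
        rw [contains_iff lst (c+1) (by omega)]; simp [hb]
      have hidx := index_eq lst (c+1) b rest (by omega) hb
      rw [stepA_eq lst acc c b p h0 (by omega) (by omega)
        (by rw [hcont, hidx]; simp; omega)]
      rw [ih _ b (by omega) (by omega), ← hrest]
      simp only [List.cons_append, List.zip_cons_cons, List.foldl_cons, pvStepB]

-- ===== VERDICT (by name: the statement is the Claim_ definition above) =====
theorem gen_index_plt_list_py_spec : Claim_equal_gen_index_plt_list_py := by
  intro plant_ids lst _
  show gen_index_plt_list_py plant_ids lst = gen_index_plt_list_py_alt plant_ids lst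
  rw [portA_eq, portB_eq]
  have h := fold_eq lst plant_ids [] 0 le_rfl (by positivity)
  simpa using h
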